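-- pv_equiv track=rewrite | github.com/relh/myst | misc/write.py | br_insert
-- ===== SOURCE A (Python) =====
-- def br_insert(data):
--     row_len = len(data)
--     row = ''
--     for i, x in enumerate(data):
--         if row_len > 5 and i % (row_len // 5) == 0 and i != 0:
--             row += '<br>'
--         row += str(x)
--     return row
-- ===== SOURCE B (Python) =====
-- def br_insert(data):
--     items = [str(x) for x in data]
--     n = len(items)
--     if n <= 5:
--         return ''.join(items)
--     k = n // 5
--     chunks = []
--     while items:
--         chunks.append(''.join(items[:k]))
--         items = items[k:]
--     return '<br>'.join(chunks)
-- ===== Notes on version B (the rewrite author's own statement) =====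
-- stated objective: alternative
-- what changed: Replaces A's single accumulating loop with a per-element modulo test by chunking: stringify once, slice the list into consecutive n//5-sized chunks, ''.join each chunk and '<br>'.join the chunk strings.
import Mathlib
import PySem

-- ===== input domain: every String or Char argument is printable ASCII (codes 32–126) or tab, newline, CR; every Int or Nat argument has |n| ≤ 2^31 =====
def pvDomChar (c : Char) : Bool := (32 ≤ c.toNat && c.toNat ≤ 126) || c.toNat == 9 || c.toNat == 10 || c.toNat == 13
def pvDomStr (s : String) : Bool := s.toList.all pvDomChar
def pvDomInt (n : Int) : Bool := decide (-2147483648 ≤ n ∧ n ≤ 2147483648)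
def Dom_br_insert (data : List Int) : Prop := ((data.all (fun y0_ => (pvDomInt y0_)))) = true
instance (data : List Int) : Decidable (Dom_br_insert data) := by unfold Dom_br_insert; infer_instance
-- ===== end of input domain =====

-- B replaces A's per-element modulo test by slicing the list into n//5-sized chunks and double-joining (alternative decomposition, same cost).

-- ===== PORT A =====
-- literal transliteration: row accumulator over enumerate(data), '<br>' inserted when i % (row_len // 5) == 0
def br_insert (data : List Int) : String :=
  let row_len : Int := data.length
  (PySem.List.enumerate data).foldl
    (fun row ix =>
      (if row_len > 5 ∧ PySem.Int.mod ix.1 (PySem.Int.floordiv row_len 5) = 0 ∧ ix.1 ≠ 0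
         then row ++ "<br>" else row) ++ PySem.Int.toStr ix.2)
    ""

-- ===== PORT B =====
-- the while loop of Source B: pop items[:k] (joined) onto chunks, keep items[k:];
-- chunk size is k ≥ 1 at the call site, written here as km1+1 (km1 = k-1) so the recursion is structural
-- ((x :: rest).take k = x :: rest.take (k-1) and (x :: rest).drop k = rest.drop (k-1) for k ≥ 1)
def chunkJoin (km1 : Nat) : List String → List String
  | [] => []
  | x :: rest => PySem.Str.join "" (x :: rest.take km1) :: chunkJoin km1 (rest.drop km1)
termination_by l => l.length
decreasing_by simp [List.length_drop]

def br_insert_alt (data : List Int) : String :=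
  let items := data.map PySem.Int.toStr
  let n := items.length
  if n ≤ 5 then PySem.Str.join "" items
  else PySem.Str.join "<br>" (chunkJoin (n / 5 - 1) items)

-- ===== PRECONDITION & SPEC =====
def Spec_br_insert (data : List Int) (out : String) : Prop := out = br_insert_alt data
instance (data : List Int) (out : String) : Decidable (Spec_br_insert data out) := by unfold Spec_br_insert; infer_instance

-- ===== CLAIM (what is proved, stated in full; the proofs are below) =====
def Claim_equal_br_insert : Prop := ∀ (data : List Int), Dom_br_insert data → Spec_br_insert data (br_insert data)

-- ===== LEMMAS AND PROOFS =====

theorem join_empty_cons (s : String) (rest : List String) :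
    PySem.Str.join "" (s :: rest) = s ++ PySem.Str.join "" rest := by
  apply String.toList_injective
  cases rest with
  | nil => simp [PySem.Str.toList_join, PySem.Chars.join_singleton, PySem.Chars.join_nil]
  | cons a b => simp [PySem.Str.toList_join, PySem.Chars.join_cons_cons]

-- A's loop, abstracted: index-carrying fold with a break predicate C
def brkFold (C : Nat → Prop) [DecidablePred C] (i : Nat) (acc : String) : List String → String
  | [] => acc
  | s :: rest => brkFold C (i+1) ((if C i then acc ++ "<br>" else acc) ++ s) rest

theorem brkFold_append (C : Nat → Prop) [DecidablePred C] (a b : List String) :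
    ∀ (i : Nat) (acc : String),
    brkFold C i acc (a ++ b) = brkFold C (i + a.length) (brkFold C i acc a) b := by
  induction a with
  | nil => intro i acc; simp [brkFold]
  | cons s rest ih =>
      intro i acc
      simp only [List.cons_append, brkFold, ih, List.length_cons]
      ring_nf

theorem brkFold_run (C : Nat → Prop) [DecidablePred C] :
    ∀ (l : List String) (i : Nat) (acc : String),
    (∀ t : Nat, t < l.length → ¬ C (i + t)) →
    brkFold C i acc l = acc ++ PySem.Str.join "" l := by
  intro l
  induction l with
  | nil =>
      intro i acc _
      show acc = acc ++ PySem.Str.join "" []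
      simp [show PySem.Str.join "" ([] : List String) = "" from rfl]
  | cons s rest ih =>
      intro i acc h
      have h0 : ¬ C i := by simpa using h 0 (by simp)
      have hrec := ih (i+1) (acc ++ s) (fun t ht => by
        have := h (t+1) (by simpa using Nat.succ_lt_succ ht)
        simpa [Nat.add_assoc, Nat.add_comm 1 t] using this)
      rw [brkFold, if_neg h0, hrec, join_empty_cons, ← String.append_assoc]

-- the A-loop fold on the enumerate list, rephrased over Nat indices
theorem foldA_eq_brkFold (C : Nat → Prop) [DecidablePred C] (step : String → (Int × Int) → String)
    (hstep : ∀ (row : String) (j : Nat) (x : Int), step row ((j : Int), x) =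
      (if C j then row ++ "<br>" else row) ++ PySem.Int.toStr x) :
    ∀ (l : List Int) (j : Nat) (acc : String),
    (PySem.List.enumerate l (j : Int)).foldl step acc
      = brkFold C j acc (l.map PySem.Int.toStr) := by
  intro l
  induction l with
  | nil => intro j acc; simp [PySem.List.enumerate_nil, brkFold]
  | cons x rest ih =>
      intro j acc
      have hc : ((j : Int) + 1) = ((j + 1 : Nat) : Int) := by push_cast; ring
      rw [PySem.List.enumerate_cons, List.foldl_cons, hstep, hc, ih, List.map_cons, brkFold]

theorem join_br_cons (s : String) (rest : List String) (h : rest ≠ []) :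
    PySem.Str.join "<br>" (s :: rest) = s ++ "<br>" ++ PySem.Str.join "<br>" rest := by
  apply String.toList_injective
  obtain ⟨r, rs, rfl⟩ := List.exists_cons_of_ne_nil h
  simp [PySem.Str.toList_join, PySem.Chars.join_cons_cons]

theorem chunkJoin_ne_nil (km1 : Nat) (l : List String) (h : l ≠ []) : chunkJoin km1 l ≠ [] := by
  obtain ⟨x, xs, rfl⟩ := List.exists_cons_of_ne_nil h
  simp [chunkJoin]

-- the main chunk lemma: A's break-fold, started at a multiple of k, is the double join of B
theorem brkFold_chunks (C : Nat → Prop) [DecidablePred C] (k : Nat) (hk : 1 ≤ k)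
    (hC : ∀ j : Nat, C j ↔ (j % k = 0 ∧ j ≠ 0)) :
    ∀ (N : Nat) (l : List String), l.length ≤ N → l ≠ [] →
    ∀ (j : Nat) (acc : String), j % k = 0 →
    brkFold C j acc l
      = acc ++ (if j = 0 then "" else "<br>") ++ PySem.Str.join "<br>" (chunkJoin (k-1) l) := by
  intro N
  induction N with
  | zero => intro l hl hne; exact absurd (List.length_eq_zero_iff.mp (Nat.le_zero.mp hl)) hne
  | succ N ihl =>
  intro l hl hne j acc hj
  obtain ⟨s, rest, rfl⟩ := List.exists_cons_of_ne_nil hne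
  have hCj : C j ↔ j ≠ 0 := by rw [hC]; simp [hj]
  have step1 : brkFold C j acc (s :: rest)
      = brkFold C (j+1) ((acc ++ (if j = 0 then "" else "<br>")) ++ s) rest := by
    by_cases h0 : j = 0
    · subst h0
      have hc : ¬ C 0 := by simp [hCj]
      simp [brkFold, hc]
    · have hc : C j := hCj.mpr h0
      simp [brkFold, h0, hc]
  rw [step1]
  have hsplit : rest = rest.take (k-1) ++ rest.drop (k-1) := (List.take_append_drop _ _).symm
  conv_lhs => rw [hsplit]
  rw [brkFold_append]
  have hrun : brkFold C (j+1) ((acc ++ (if j = 0 then "" else "<br>")) ++ s) (rest.take (k-1))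
      = (acc ++ (if j = 0 then "" else "<br>")) ++ s ++ PySem.Str.join "" (rest.take (k-1)) := by
    apply brkFold_run
    intro t ht
    rw [hC]
    have ht' : t < k - 1 := lt_of_lt_of_le ht (by simp)
    intro ⟨hmod, _⟩
    have hmm : (j + 1 + t) % k = (1 + t) % k := by
      conv_lhs => rw [Nat.add_assoc, Nat.add_mod, hj]
      simp [Nat.add_comm 1 t]
    rw [hmm, Nat.mod_eq_of_lt (by omega)] at hmod
    omega
  rw [hrun]
  by_cases hd : rest.drop (k-1) = []
  · rw [hd]
    have hcj : chunkJoin (k-1) (s :: rest) = [PySem.Str.join "" (s :: rest.take (k-1))] := by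
      rw [chunkJoin, hd]; simp [chunkJoin]
    rw [hcj]
    show _ = acc ++ _ ++ PySem.Str.join "<br>" [_]
    apply String.toList_injective
    simp [brkFold, PySem.Str.toList_join, PySem.Chars.join_singleton, join_empty_cons]
  · have hlen : k - 1 ≤ rest.length := by
      by_contra h
      exact hd (List.drop_eq_nil_of_le (by omega))
    have htk : (rest.take (k-1)).length = k - 1 := by simp [hlen]
    have hjk : j + 1 + (rest.take (k-1)).length = j + k := by rw [htk]; omega
    have ihd := ihl (rest.drop (k-1))
      (by simp only [List.length_drop]; simp at hl; omega) hd (j + k)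
      ((acc ++ (if j = 0 then "" else "<br>")) ++ s ++ PySem.Str.join "" (rest.take (k-1)))
      (by simp [hj])
    rw [hjk, ihd]
    have hcj : chunkJoin (k-1) (s :: rest)
        = PySem.Str.join "" (s :: rest.take (k-1)) :: chunkJoin (k-1) (rest.drop (k-1)) := by
      rw [chunkJoin]
    rw [hcj, join_br_cons _ _ (chunkJoin_ne_nil _ _ hd)]
    rw [if_neg (by omega : ¬ j + k = 0)]
    apply String.toList_injective
    simp [PySem.Str.toList_join, join_empty_cons]

-- ===== VERDICT (by name: the statement is the Claim_ definition above) =====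
theorem br_insert_spec : Claim_equal_br_insert := by
  intro data _
  unfold Spec_br_insert br_insert br_insert_alt
  simp only [List.length_map]
  set n := data.length with hn
  have henum : PySem.List.enumerate data = PySem.List.enumerate data ((0 : Nat) : Int) := by
    norm_num [PySem.List.enumerate]
  by_cases h5 : n ≤ 5
  · have hA := foldA_eq_brkFold (fun _ => False)
      (fun row ix =>
        (if (n : Int) > 5 ∧ PySem.Int.mod ix.1 (PySem.Int.floordiv (n : Int) 5) = 0 ∧ ix.1 ≠ 0
           then row ++ "<br>" else row) ++ PySem.Int.toStr ix.2)
      (by intro row j x; simp only; rw [if_neg, if_neg]; simp; intro h; omega)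
      data 0 ""
    rw [henum, hA, brkFold_run _ _ _ _ (by simp), if_pos h5]
    simp
  · have hk : 1 ≤ n / 5 := by omega
    have hmodiff : PySem.Int.floordiv (n : Int) 5 = ((n / 5 : Nat) : Int) := by
      exact_mod_cast PySem.Int.floordiv_natCast n 5
    have hA := foldA_eq_brkFold (fun j : Nat => j % (n / 5) = 0 ∧ j ≠ 0)
      (fun row ix =>
        (if (n : Int) > 5 ∧ PySem.Int.mod ix.1 (PySem.Int.floordiv (n : Int) 5) = 0 ∧ ix.1 ≠ 0
           then row ++ "<br>" else row) ++ PySem.Int.toStr ix.2)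
      (by
        intro row j x
        simp only
        congr 1
        have h1 : ((n : Int) > 5) := by exact_mod_cast (show 5 < n by omega)
        have h2 : PySem.Int.mod (j : Int) (PySem.Int.floordiv (n : Int) 5)
            = ((j % (n / 5) : Nat) : Int) := by
          rw [hmodiff]; exact_mod_cast PySem.Int.mod_natCast j (n / 5)
        by_cases hj : j % (n / 5) = 0 ∧ j ≠ 0
        · rw [if_pos, if_pos hj]
          refine ⟨h1, by rw [h2]; exact_mod_cast hj.1, by exact_mod_cast hj.2⟩
        · rw [if_neg, if_neg hj]
          intro ⟨_, hm, hne⟩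
          apply hj
          constructor
          · rw [h2] at hm; exact_mod_cast hm
          · exact_mod_cast hne)
      data 0 ""
    have hne : data.map PySem.Int.toStr ≠ [] := by
      intro h
      have hlen0 := congrArg List.length h
      rw [List.length_map] at hlen0
      simp only [List.length_nil] at hlen0
      omega
    rw [henum, hA,
      brkFold_chunks _ (n / 5) hk (fun j => Iff.rfl) (data.map PySem.Int.toStr).length
        _ le_rfl hne 0 "" (by simp),
      if_neg (show ¬ data.length ≤ 5 by omega)]
    simp
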